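-- pv_equiv track=rewrite | github.com/Balcalli17/Ing-Sistemas-UPEA-by-Balcalli | 1er Semestre/practica para examen3.py | matrizZinver
-- ===== SOURCE A (Python) =====
-- def matrizZinver(n):
--     matriz = [[0]*n for _ in range (n)]
--     for i in range(0,n):
--         for j in range(0,n):
--             if(j == 0) or (i == j) or (j == n-1):
--                 matriz[i][j]=1
--             else:
--                 matriz[i][j]=0
--     return matriz
-- ===== SOURCE B (Python) =====
-- def matrizZinver(n):
--     if n <= 0:
--         return []
--     if n == 1:
--         return [[1]]
--     def fila(i):
--         medio = [0] * (n - 2)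
--         if 0 < i < n - 1:
--             medio[i - 1] = 1
--         return [1] + medio + [1]
--     return [fila(i) for i in range(n)]
-- ===== Notes on version B (the rewrite author's own statement) =====
-- stated objective: alternative
-- what changed: B builds each row by concatenating segments ([1] + zero middle with at most one 1 spliced at the diagonal + [1]) and never scans or tests individual columns, instead of A's branchy per-cell scan writing all n^2 cells.
import Mathlib
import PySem

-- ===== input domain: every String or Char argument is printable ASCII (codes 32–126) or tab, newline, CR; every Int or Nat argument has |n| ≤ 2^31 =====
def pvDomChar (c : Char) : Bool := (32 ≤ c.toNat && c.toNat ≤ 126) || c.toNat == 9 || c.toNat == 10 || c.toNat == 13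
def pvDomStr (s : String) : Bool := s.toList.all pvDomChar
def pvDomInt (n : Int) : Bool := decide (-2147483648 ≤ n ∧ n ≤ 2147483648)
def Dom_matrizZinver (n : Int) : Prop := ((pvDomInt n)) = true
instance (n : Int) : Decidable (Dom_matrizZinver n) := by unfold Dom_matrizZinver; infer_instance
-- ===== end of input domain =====

-- B builds each row by segment concatenation ([1] + zero middle with the diagonal 1 spliced in + [1])
-- instead of A's branchy per-cell scan over all n² cells (objective: alternative construction).

-- ===== PORT A =====
-- '[0]*n' is List.replicate n.toNat 0 (empty for n ≤ 0, exactly as Python list repetition);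
-- the loop indices i, j come from range(0, n) so they are nonnegative and in range, making
-- '.toNat' on them exact (no clamping can occur).
def matrizZinver (n : Int) : List (List Int) :=
  let matriz := (PySem.List.pyRange 0 n 1).map (fun _ => List.replicate n.toNat (0 : Int))
  (PySem.List.pyRange 0 n 1).foldl (fun m i =>
    (PySem.List.pyRange 0 n 1).foldl (fun m j =>
      if j = 0 ∨ i = j ∨ j = n - 1 then
        m.set i.toNat ((m.getD i.toNat []).set j.toNat 1)
      else
        m.set i.toNat ((m.getD i.toNat []).set j.toNat 0)) m) matriz

-- ===== PORT B =====
-- transliteration of Source B: early returns for n ≤ 0 and n = 1, then each row is the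
-- concatenation [1] ++ medio ++ [1]; 'medio[i-1] = 1' is exact since 0 < i < n-1.
def matrizZinver_alt (n : Int) : List (List Int) :=
  if n ≤ 0 then []
  else if n = 1 then [[1]]
  else
    (PySem.List.pyRange 0 n 1).map (fun i =>
      let medio := List.replicate (n - 2).toNat (0 : Int)
      let medio := if 0 < i ∧ i < n - 1 then medio.set (i - 1).toNat 1 else medio
      [1] ++ medio ++ [1])

-- ===== PRECONDITION & SPEC =====
def Spec_matrizZinver (n : Int) (out : List (List Int)) : Prop := out = matrizZinver_alt n
instance (n : Int) (out : List (List Int)) : Decidable (Spec_matrizZinver n out) := by unfold Spec_matrizZinver; infer_instance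

-- ===== CLAIM (what is proved, stated in full; the proofs are below) =====
def Claim_equal_matrizZinver : Prop := ∀ (n : Int), Dom_matrizZinver n → Spec_matrizZinver n (matrizZinver n)

-- ===== LEMMAS AND PROOFS =====

-- range(0,n) as a map over a Nat range
theorem pvRangeNat (n : Int) :
    PySem.List.pyRange 0 n 1 = (List.range n.toNat).map (fun (k : Nat) => (k : Int)) := by
  rw [PySem.List.pyRange_one]
  simp only [Int.sub_zero]
  exact List.map_congr_left (fun a _ => by omega)

-- a sequence of in-place assignments to row i of the matrix equals one assignment of the folded row
theorem pvInnerToRow (js : List Nat) :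
    ∀ (m : List (List Int)) (i : Nat) (v : Nat → Int), i < m.length →
    js.foldl (fun m j => m.set i ((m.getD i []).set j (v j))) m
      = m.set i (js.foldl (fun r j => r.set j (v j)) (m.getD i [])) := by
  induction js with
  | nil =>
      intro m i v hi
      simp only [List.foldl_nil]
      rw [List.getD_eq_getElem m [] hi, List.set_getElem_self]
  | cons j js ih =>
      intro m i v hi
      have hi' : i < (m.set i ((m.getD i []).set j (v j))).length := by simpa using hi
      simp only [List.foldl_cons]
      rw [ih _ i v hi', List.set_set,
        List.getD_eq_getElem _ [] hi', List.getElem_set_self,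
        List.getD_eq_getElem m [] hi]

-- overwriting positions 0..k-1 of a row with v 0 .. v (k-1)
theorem pvRowFold (k : Nat) :
    ∀ (row : List Int) (v : Nat → Int), k ≤ row.length →
    (List.range k).foldl (fun r j => r.set j (v j)) row
      = (List.range k).map v ++ row.drop k := by
  induction k with
  | zero => intro row v _; simp
  | succ k ih =>
      intro row v hk
      have hk' : k < row.length := by omega
      rw [List.range_succ, List.foldl_append, ih row v (by omega)]
      simp only [List.foldl_cons, List.foldl_nil, List.map_append, List.map_cons, List.map_nil]
      rw [List.set_append]
      have hlen : ((List.range k).map v).length = k := by simp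
      rw [hlen]
      simp only [lt_self_iff_false, if_false, Nat.sub_self]
      rw [List.drop_eq_getElem_cons hk', List.set_cons_zero, List.append_assoc,
        List.singleton_append]

-- generic row-by-row update of a replicated matrix
theorem pvMatFold (N : Nat) (z : List Int) (k : Nat) :
    ∀ (F : List (List Int) → Nat → List (List Int)) (G : List Int → Nat → List Int),
    k ≤ N →
    (∀ m i, m.length = N → i < N → F m i = m.set i (G (m.getD i []) i)) →
    (List.range k).foldl F (List.replicate N z)
      = (List.range k).map (fun i => G z i) ++ List.replicate (N - k) z := by
  induction k with
  | zero => intro F G _ _; simp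
  | succ k ih =>
      intro F G hk hF
      have hk' : k < N := by omega
      rw [List.range_succ, List.foldl_append, ih F G (by omega) hF]
      simp only [List.foldl_cons, List.foldl_nil, List.map_append, List.map_cons, List.map_nil]
      have hlen : ((List.range k).map (fun i => G z i) ++ List.replicate (N - k) z).length = N := by
        simp; omega
      rw [hF _ k hlen hk']
      have hmaplen : ((List.range k).map (fun i => G z i)).length = k := by simp
      have hrep : List.replicate (N - k) z = z :: List.replicate (N - (k + 1)) z := by
        have : N - k = (N - (k + 1)) + 1 := by omega
        rw [this, List.replicate_succ]
      rw [List.set_append, hmaplen]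
      simp only [lt_self_iff_false, if_false, Nat.sub_self]
      have hget : ((List.range k).map (fun i => G z i) ++ List.replicate (N - k) z).getD k [] = z := by
        rw [List.getD_eq_getElem _ [] (by rw [hlen]; omega), List.getElem_append_right (by omega)]
        simp [hmaplen, hrep]
      rw [hget, hrep]
      simp [List.append_assoc]

-- A's nested fold in closed form
theorem pvAclosed (n : Int) :
    (List.range n.toNat).foldl (fun (m : List (List Int)) (i : Nat) =>
      (List.range n.toNat).foldl (fun (m : List (List Int)) (j : Nat) =>
        if (j : Int) = 0 ∨ (i : Int) = (j : Int) ∨ (j : Int) = n - 1 then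
          m.set i ((m.getD i []).set j 1)
        else
          m.set i ((m.getD i []).set j 0)) m)
      (List.replicate n.toNat (List.replicate n.toNat (0 : Int)))
      = (List.range n.toNat).map (fun (i : Nat) =>
          (List.range n.toNat).map (fun (j : Nat) =>
            if (j : Int) = 0 ∨ (i : Int) = (j : Int) ∨ (j : Int) = n - 1 then 1 else 0)) := by
  rw [pvMatFold n.toNat (List.replicate n.toNat (0 : Int)) n.toNat _
    (fun row i => (List.range n.toNat).foldl
      (fun r j => r.set j (if (j : Int) = 0 ∨ (i : Int) = (j : Int) ∨ (j : Int) = n - 1 then 1 else 0)) row)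
    le_rfl ?_]
  · rw [Nat.sub_self, List.replicate_zero, List.append_nil]
    apply List.map_congr_left
    intro i _
    rw [pvRowFold n.toNat (List.replicate n.toNat (0 : Int)) _ (by simp)]
    simp
  · intro m i hm hi
    have hbody : (fun (m : List (List Int)) (j : Nat) =>
        if (j : Int) = 0 ∨ (i : Int) = (j : Int) ∨ (j : Int) = n - 1 then
          m.set i ((m.getD i []).set j 1)
        else
          m.set i ((m.getD i []).set j 0))
        = (fun (m : List (List Int)) (j : Nat) =>
          m.set i ((m.getD i []).set j
            (if (j : Int) = 0 ∨ (i : Int) = (j : Int) ∨ (j : Int) = n - 1 then 1 else 0))) := by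
      funext m j
      split <;> rfl
    rw [hbody, pvInnerToRow (List.range n.toNat) m i _ (by omega)]

-- B's concatenated row equals A's branch-selected row (n ≥ 2)
theorem pvRowSegEq (n : Int) (i : Nat) (h2 : 2 ≤ n) :
    (let medio := List.replicate (n - 2).toNat (0 : Int)
     let medio := if 0 < (i : Int) ∧ (i : Int) < n - 1 then medio.set ((i : Int) - 1).toNat 1 else medio
     ([1] ++ medio ++ [1] : List Int))
      = (List.range n.toNat).map (fun (j : Nat) =>
          if (j : Int) = 0 ∨ (i : Int) = (j : Int) ∨ (j : Int) = n - 1 then 1 else 0) := by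
  have hmlen : ∀ (m : List Int),
      (if 0 < (i : Int) ∧ (i : Int) < n - 1 then (List.replicate (n - 2).toNat (0 : Int)).set ((i : Int) - 1).toNat 1 else List.replicate (n - 2).toNat (0 : Int)).length = (n - 2).toNat := by
    intro m; split <;> simp
  apply List.ext_getElem
  · simp only [List.length_append, List.length_map, List.length_range, List.length_cons,
      List.length_nil]
    rw [hmlen []]
    omega
  · intro j hj hj'
    have hjn : j < n.toNat := by simpa using hj'
    simp only [List.getElem_map, List.getElem_range]
    rcases Nat.eq_or_lt_of_le (Nat.zero_le j) with h0 | h0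
    · -- j = 0
      subst h0
      simp only [List.getElem_append, List.length_cons, List.length_nil]
      norm_num
    · -- j ≥ 1
      have hj1 : 1 ≤ j := h0
      by_cases hlast : j = n.toNat - 1
      · -- last column
        have : ¬ j < ([1] ++ (if 0 < (i : Int) ∧ (i : Int) < n - 1 then (List.replicate (n - 2).toNat (0 : Int)).set ((i : Int) - 1).toNat 1 else List.replicate (n - 2).toNat (0 : Int))).length := by
          simp only [List.length_append, List.length_cons, List.length_nil]
          rw [hmlen []]; omega
        rw [List.getElem_append_right (by omega)]
        have hidx : j - ([1] ++ (if 0 < (i : Int) ∧ (i : Int) < n - 1 then (List.replicate (n - 2).toNat (0 : Int)).set ((i : Int) - 1).toNat 1 else List.replicate (n - 2).toNat (0 : Int))).length = 0 := by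
          simp only [List.length_append, List.length_cons, List.length_nil]
          rw [hmlen []]; omega
        simp only [hidx, List.getElem_cons_zero]
        have : ((j : Nat) : Int) = n - 1 := by omega
        simp [this]
      · -- middle column: element j comes from medio at index j-1
        have hmid : j - 1 < (n - 2).toNat := by omega
        rw [List.getElem_append_left (by
          simp only [List.length_append, List.length_cons, List.length_nil]
          rw [hmlen []]; omega),
          List.getElem_append_right (by simp; omega)]
        simp only [List.length_cons, List.length_nil]
        split
        · rename_i hi
          rw [List.getElem_set]
          by_cases he : ((i : Int) - 1).toNat = j - (0 + 1)
          · rw [if_pos he]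
            have hij : (i : Int) = (j : Int) := by omega
            rw [if_pos (Or.inr (Or.inl hij))]
          · rw [if_neg he]
            simp only [List.getElem_replicate]
            rw [if_neg (by omega)]
        · rename_i hi
          simp only [List.getElem_replicate]
          rw [if_neg (by omega)]

-- A in fully closed form for any n
theorem pvAmap (n : Int) :
    matrizZinver n = (List.range n.toNat).map (fun (i : Nat) =>
      (List.range n.toNat).map (fun (j : Nat) =>
        if (j : Int) = 0 ∨ (i : Int) = (j : Int) ∨ (j : Int) = n - 1 then 1 else 0)) := by
  unfold matrizZinver
  rw [pvRangeNat]
  simp only [List.foldl_map, List.map_map, Int.toNat_natCast]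
  have hmatriz : (List.range n.toNat).map
      ((fun _ => List.replicate n.toNat (0 : Int)) ∘ (fun (k : Nat) => (k : Int)))
      = List.replicate n.toNat (List.replicate n.toNat (0 : Int)) := by
    simp [Function.comp_def]
  rw [hmatriz]
  exact pvAclosed n

-- ===== VERDICT (by name: the statement is the Claim_ definition above) =====
theorem matrizZinver_spec : Claim_equal_matrizZinver := by
  intro n _
  unfold Spec_matrizZinver
  rw [pvAmap]
  unfold matrizZinver_alt
  by_cases hle : n ≤ 0
  · rw [if_pos hle]
    have : n.toNat = 0 := by omega
    simp [this]
  rw [if_neg hle]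
  by_cases h1 : n = 1
  · subst h1; decide
  rw [if_neg h1]
  have h2 : 2 ≤ n := by omega
  rw [pvRangeNat]
  rw [List.map_map]
  apply List.map_congr_left
  intro i _
  exact (pvRowSegEq n i h2).symm
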